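-- pv_equiv track=rewrite | github.com/pedroapfilho/acestep-trainer | scripts/monitor_jobs.py | get_shard_info
-- ===== SOURCE A (Python) =====
-- def get_shard_info(command: list[str]) -> str:
--     """Extract shard info from job command."""
--     cmd = " ".join(command) if command else ""
--     if "--shard-id" in cmd:
--         parts = cmd.split()
--         for i, p in enumerate(parts):
--             if p == "--shard-id" and i + 1 < len(parts):
--                 shard_id = parts[i + 1]
--                 num_shards = "?"
--                 for j, q in enumerate(parts):
--                     if q == "--num-shards" and j + 1 < len(parts):
--                         num_shards = parts[j + 1]
--                 return f"shard {shard_id}/{num_shards}"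
--     if "label.py" in cmd:
--         return "label"
--     if "preprocess.py" in cmd:
--         return "preprocess"
--     if "train.py" in cmd:
--         return "train"
--     return "unknown"
-- ===== SOURCE B (Python) =====
-- def get_shard_info(command: list[str]) -> str:
--     """Extract shard info from job command."""
--     cmd = " ".join(command)
--     if "--shard-id" in cmd:
--         # one pass over adjacent token pairs: first --shard-id wins, last --num-shards wins
--         flags = {}
--         parts = cmd.split()
--         for f, v in zip(parts, parts[1:]):
--             if f == "--shard-id":
--                 flags.setdefault(f, v)
--             elif f == "--num-shards":
--                 flags[f] = v
--         if "--shard-id" in flags: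
--             return f"shard {flags['--shard-id']}/{flags.get('--num-shards', '?')}"
--     for key, name in (("label.py", "label"), ("preprocess.py", "preprocess"), ("train.py", "train")):
--         if key in cmd:
--             return name
--     return "unknown"
-- ===== Notes on version B (the rewrite author's own statement) =====
-- stated objective: simpler
-- what changed: Replaces A's nested enumerate scans (find --shard-id, then rescan all tokens for --num-shards) by a single pass over adjacent token pairs building a flag dict (setdefault keeps the first --shard-id, plain assignment keeps the last --num-shards), then O(1) lookups; the label/preprocess/train substring chain becomes a small table loop.
import Mathlib
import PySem

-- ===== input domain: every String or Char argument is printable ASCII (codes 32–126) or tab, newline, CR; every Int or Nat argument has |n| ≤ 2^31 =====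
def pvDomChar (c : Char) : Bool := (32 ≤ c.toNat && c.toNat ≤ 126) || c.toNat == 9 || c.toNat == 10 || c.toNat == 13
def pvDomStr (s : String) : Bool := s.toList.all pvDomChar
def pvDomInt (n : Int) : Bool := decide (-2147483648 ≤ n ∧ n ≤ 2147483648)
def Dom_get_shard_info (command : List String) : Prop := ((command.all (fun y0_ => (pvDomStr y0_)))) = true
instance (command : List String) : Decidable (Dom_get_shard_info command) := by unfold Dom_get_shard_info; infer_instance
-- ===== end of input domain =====

-- B replaces A's nested token scans by one pass over adjacent token pairs building a flag dict, then O(1) lookups (objective: simpler).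


-- ===== PORT A =====
-- first token equal to "--shard-id" that has a successor (A's outer enumerate loop)
def aFindShard : List String → Option String
  | p :: q :: rest => if p = "--shard-id" then some q else aFindShard (q :: rest)
  | _ => none

-- A's inner enumerate loop: reassigns num_shards at every "--num-shards" with a successor (last wins)
def aNumShards : List String → String → String
  | p :: q :: rest, acc => aNumShards (q :: rest) (if p = "--num-shards" then q else acc)
  | _, acc => acc

-- A's trailing chain of substring tests
def aLabels (cmd : String) : String :=
  if PySem.Str.isIn "label.py" cmd then "label"
  else if PySem.Str.isIn "preprocess.py" cmd then "preprocess"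
  else if PySem.Str.isIn "train.py" cmd then "train"
  else "unknown"

def get_shard_info (command : List String) : String :=
  let cmd := if command = [] then "" else PySem.Str.join " " command
  if PySem.Str.isIn "--shard-id" cmd then
    let parts := PySem.Str.split₀ cmd
    match aFindShard parts with
    | some shard_id => "shard " ++ shard_id ++ "/" ++ aNumShards parts "?"
    | none => aLabels cmd
  else aLabels cmd

-- ===== PORT B =====
-- B's single pass over zip(parts, parts[1:]): setdefault for --shard-id, overwrite for --num-shards
def bFlags (parts : List String) : PySem.Dict String String :=
  (parts.zip parts.tail).foldl
    (fun d fv =>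
      if fv.1 = "--shard-id" then d.setdefault fv.1 fv.2
      else if fv.1 = "--num-shards" then d.insert fv.1 fv.2
      else d)
    PySem.Dict.empty

-- B's table loop over ((key, name), …)
def bLabels (cmd : String) : List (String × String) → String
  | [] => "unknown"
  | (key, name) :: rest => if PySem.Str.isIn key cmd then name else bLabels cmd rest

def get_shard_info_alt (command : List String) : String :=
  let cmd := PySem.Str.join " " command
  (if PySem.Str.isIn "--shard-id" cmd then
    let flags := bFlags (PySem.Str.split₀ cmd)
    match flags.get? "--shard-id" with
    | some sid => some ("shard " ++ sid ++ "/" ++ flags.getD "--num-shards" "?")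
    | none => none
  else none).getD
    (bLabels cmd [("label.py", "label"), ("preprocess.py", "preprocess"), ("train.py", "train")])

-- ===== PRECONDITION & SPEC =====
def Spec_get_shard_info (command : List String) (out : String) : Prop := out = get_shard_info_alt command
instance (command : List String) (out : String) : Decidable (Spec_get_shard_info command out) := by unfold Spec_get_shard_info; infer_instance

-- ===== CLAIM (what is proved, stated in full; the proofs are below) =====
def Claim_equal_get_shard_info : Prop := ∀ (command : List String), Dom_get_shard_info command → Spec_get_shard_info command (get_shard_info command)

-- ===== LEMMAS AND PROOFS =====
-- proof-side: last "--num-shards" value with a successor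
def lastNum : List String → Option String
  | p :: q :: rest =>
    match lastNum (q :: rest) with
    | some v => some v
    | none => if p = "--num-shards" then some q else none
  | _ => none

theorem aNumShards_eq_lastNum (parts : List String) (acc : String) :
    aNumShards parts acc = (lastNum parts).getD acc := by
  induction parts generalizing acc with
  | nil => rfl
  | cons p rest ih =>
    cases rest with
    | nil => rfl
    | cons q rest' =>
      show aNumShards (q :: rest') (if p = "--num-shards" then q else acc) = _
      rw [ih]
      cases h : lastNum (q :: rest') with
      | some v => simp [lastNum, h]
      | none =>
        simp only [lastNum, h]
        split_ifs <;> rfl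

theorem bFlags_get_shard (parts : List String) :
    ∀ d : PySem.Dict String String,
      ((parts.zip parts.tail).foldl
        (fun d fv =>
          if fv.1 = "--shard-id" then d.setdefault fv.1 fv.2
          else if fv.1 = "--num-shards" then d.insert fv.1 fv.2
          else d) d).get? "--shard-id"
      = match d.get? "--shard-id" with
        | some v => some v
        | none => aFindShard parts := by
  induction parts with
  | nil => intro d; cases h : d.get? "--shard-id" <;> simp [aFindShard, h]
  | cons p rest ih =>
    cases rest with
    | nil => intro d; cases h : d.get? "--shard-id" <;> simp [aFindShard, h]
    | cons q rest' =>
      intro d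
      rw [show (p :: q :: rest').zip (p :: q :: rest').tail
            = (p, q) :: ((q :: rest').zip (q :: rest').tail) from rfl]
      rw [List.foldl_cons, ih]
      by_cases hp : p = "--shard-id"
      · subst hp
        simp only [aFindShard]
        cases h : d.get? "--shard-id" <;>
          simp [PySem.Dict.get?_setdefault_self, h]
      · have hstep :
            (if p = "--shard-id" then d.setdefault p q
             else if p = "--num-shards" then d.insert p q else d).get? "--shard-id"
              = d.get? "--shard-id" := by
          rw [if_neg hp]
          by_cases hn : p = "--num-shards"
          · subst hn
            rw [if_pos rfl, PySem.Dict.get?_insert_of_ne _ _ (by decide)]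
          · rw [if_neg hn]
        rw [hstep]
        have hfind : aFindShard (p :: q :: rest') = aFindShard (q :: rest') := by
          simp [aFindShard, hp]
        rw [hfind]

theorem bFlags_get_num (parts : List String) :
    ∀ d : PySem.Dict String String,
      ((parts.zip parts.tail).foldl
        (fun d fv =>
          if fv.1 = "--shard-id" then d.setdefault fv.1 fv.2
          else if fv.1 = "--num-shards" then d.insert fv.1 fv.2
          else d) d).get? "--num-shards"
      = match lastNum parts with
        | some v => some v
        | none => d.get? "--num-shards" := by
  induction parts with
  | nil => intro d; cases h : d.get? "--num-shards" <;> simp [lastNum, h]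
  | cons p rest ih =>
    cases rest with
    | nil => intro d; cases h : d.get? "--num-shards" <;> simp [lastNum, h]
    | cons q rest' =>
      intro d
      rw [show (p :: q :: rest').zip (p :: q :: rest').tail
            = (p, q) :: ((q :: rest').zip (q :: rest').tail) from rfl]
      rw [List.foldl_cons, ih]
      by_cases hn : p = "--num-shards"
      · subst hn
        have h1 : (if "--num-shards" = "--shard-id" then d.setdefault "--num-shards" q
             else if "--num-shards" = "--num-shards" then d.insert "--num-shards" q
             else d).get? "--num-shards" = some q := by
          rw [if_neg (by decide), if_pos rfl, PySem.Dict.get?_insert_self]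
        rw [h1]
        have h2 : lastNum ("--num-shards" :: q :: rest')
            = match lastNum (q :: rest') with
              | some v => some v
              | none => some q := by
          simp [lastNum]
        rw [h2]
        cases lastNum (q :: rest') <;> rfl
      · have hstep :
            (if p = "--shard-id" then d.setdefault p q
             else if p = "--num-shards" then d.insert p q else d).get? "--num-shards"
              = d.get? "--num-shards" := by
          by_cases hp : p = "--shard-id"
          · subst hp
            rw [if_pos rfl, PySem.Dict.get?_setdefault_of_ne _ _ (by decide)]
          · rw [if_neg hp, if_neg hn]
        rw [hstep]
        have hlast : lastNum (p :: q :: rest') = lastNum (q :: rest') := by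
          cases h : lastNum (q :: rest') <;> simp [lastNum, h, hn]
        rw [hlast]

theorem labels_eq (cmd : String) :
    aLabels cmd = bLabels cmd [("label.py", "label"), ("preprocess.py", "preprocess"), ("train.py", "train")] := by
  rfl

-- ===== VERDICT (by name: the statement is the Claim_ definition above) =====
theorem get_shard_info_spec : Claim_equal_get_shard_info := by
  intro command _
  unfold Spec_get_shard_info get_shard_info get_shard_info_alt
  have hcmd : (if command = [] then "" else PySem.Str.join " " command)
      = PySem.Str.join " " command := by
    cases command with
    | nil => rfl
    | cons a l => rfl
  rw [hcmd]
  set cmd := PySem.Str.join " " command with hc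
  have hget : (bFlags (PySem.Str.split₀ cmd)).get? "--shard-id"
      = aFindShard (PySem.Str.split₀ cmd) := by
    rw [bFlags, bFlags_get_shard (PySem.Str.split₀ cmd) PySem.Dict.empty]
    rfl
  have hnum : (bFlags (PySem.Str.split₀ cmd)).getD "--num-shards" "?"
      = aNumShards (PySem.Str.split₀ cmd) "?" := by
    rw [PySem.Dict.getD_eq_get?_getD, bFlags,
        bFlags_get_num (PySem.Str.split₀ cmd) PySem.Dict.empty,
        aNumShards_eq_lastNum]
    cases lastNum (PySem.Str.split₀ cmd) <;> rfl
  by_cases hin : PySem.Str.isIn "--shard-id" cmd = true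
  · simp only [hin, if_true]
    cases hfind : aFindShard (PySem.Str.split₀ cmd) with
    | some sid => simp [hget, hfind, hnum]
    | none => simp [hget, hfind, labels_eq cmd]
  · simp only [hin, if_false, Bool.false_eq_true]
    simp [labels_eq cmd]
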